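-- pv_equiv track=rewrite | github.com/liangfuliang541-pixel/clawswarm | guard.py | validate_command
-- ===== SOURCE A (Python) =====
-- def validate_command(cmd: str) -> bool:
--     """
--     验证命令是否允许执行
--     返回: True=允许, False=禁止
--     """
--     cmd_lower = cmd.lower()
--
--     # 高危命令黑名单
--     dangerous = [
--         "rm -rf /",
--         "format c:",
--         "del /f /s /q",
--         ">>",
--         ">",
--         "|",
--         "&&",
--         ";;",
--         "powershell",
--         "cmd.exe",
--         "wscript",
--         "cscript",
--     ]
--
--     for d in dangerous:
--         if d in cmd_lower:
--             return False
--
--     return True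
-- ===== SOURCE B (Python) =====
-- DANGEROUS = [
--     "rm -rf /",
--     "format c:",
--     "del /f /s /q",
--     ">>",
--     ">",
--     "|",
--     "&&",
--     ";;",
--     "powershell",
--     "cmd.exe",
--     "wscript",
--     "cscript",
-- ]
--
--
-- def validate_command(cmd: str) -> bool:
--     """Online multi-pattern matcher (NFA simulation): one forward pass over
--     the command keeping the set of live partial matches (pattern, matched
--     length); a pattern completing during the pass forbids the command."""
--     s = cmd.lower()
--     active = []  # live partial matches: (pattern, number of chars matched)
--     for c in s:
--         new_active = []
--         for d, j in active:
--             if d[j] == c: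
--                 if j + 1 == len(d):
--                     return False
--                 new_active.append((d, j + 1))
--         for d in DANGEROUS:
--             if d[0] == c:
--                 if len(d) == 1:
--                     return False
--                 new_active.append((d, 1))
--         active = new_active
--     return True
-- ===== Notes on version B (the rewrite author's own statement) =====
-- stated objective: alternative
-- what changed: A runs one full substring scan of the command per blacklist pattern; B is an online multi-pattern matcher: a single forward pass over the command that maintains the set of live partial matches (pattern, matched-length) and rejects as soon as any pattern completes, never rescanning the input.
import Mathlib
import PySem

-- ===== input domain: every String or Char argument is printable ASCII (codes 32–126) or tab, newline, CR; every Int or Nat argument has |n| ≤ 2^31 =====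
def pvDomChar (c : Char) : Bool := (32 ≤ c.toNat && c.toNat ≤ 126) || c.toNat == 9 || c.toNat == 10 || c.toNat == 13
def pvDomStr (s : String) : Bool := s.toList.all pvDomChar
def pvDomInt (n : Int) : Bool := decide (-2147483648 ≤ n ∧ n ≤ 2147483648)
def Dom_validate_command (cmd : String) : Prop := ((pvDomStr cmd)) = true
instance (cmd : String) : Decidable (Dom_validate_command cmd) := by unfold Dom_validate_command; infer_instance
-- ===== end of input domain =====

-- B replaces A's per-pattern repeated substring scans by a single forward pass that
-- maintains the set of live partial matches (objective: alternative, same result).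

-- ===== PORT A =====
def pvDangerous : List String :=
  ["rm -rf /", "format c:", "del /f /s /q", ">>", ">", "|", "&&", ";;",
   "powershell", "cmd.exe", "wscript", "cscript"]

-- 'for d in dangerous: if d in cmd_lower: return False / return True'
def validate_command (cmd : String) : Bool :=
  let cmd_lower := PySem.Str.lower cmd
  pvDangerous.all (fun d => !(PySem.Str.isIn d cmd_lower))

-- ===== PORT B =====
-- patterns as char lists (Python indexes the pattern strings character-wise)
def pvPats : List (List Char) := pvDangerous.map String.toList

-- inner loop 'for d, j in active: …' building new_active; none = early 'return False'
def pvExtend (c : Char) : List (List Char × Nat) → Option (List (List Char × Nat))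
  | [] => some []
  | (d, j) :: rest =>
    if d[j]? = some c then
      if j + 1 = d.length then none
      else (pvExtend c rest).map (fun l => (d, j + 1) :: l)
    else pvExtend c rest

-- inner loop 'for d in DANGEROUS: …'; none = early 'return False'
def pvStart (c : Char) : List (List Char) → Option (List (List Char × Nat))
  | [] => some []
  | d :: rest =>
    if d[0]? = some c then
      if d.length = 1 then none
      else (pvStart c rest).map (fun l => (d, 1) :: l)
    else pvStart c rest

-- one iteration of 'for c in s'
def pvStep (st : Option (List (List Char × Nat))) (c : Char) :
    Option (List (List Char × Nat)) :=
  match st with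
  | none => none
  | some active =>
    match pvExtend c active, pvStart c pvPats with
    | some e, some st' => some (e ++ st')
    | _, _ => none

def validate_command_alt (cmd : String) : Bool :=
  (((PySem.Str.lower cmd).toList).foldl pvStep (some [])).isSome

-- ===== PRECONDITION & SPEC =====
def Spec_validate_command (cmd : String) (out : Bool) : Prop := out = validate_command_alt cmd
instance (cmd : String) (out : Bool) : Decidable (Spec_validate_command cmd out) := by unfold Spec_validate_command; infer_instance

-- ===== CLAIM (what is proved, stated in full; the proofs are below) =====
def Claim_equal_validate_command : Prop := ∀ (cmd : String), Dom_validate_command cmd → Spec_validate_command cmd (validate_command cmd)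

-- ===== LEMMAS AND PROOFS =====

theorem pv_pats_ne_nil : ∀ d ∈ pvPats, d ≠ [] := by decide

-- a live partial match: j characters of d already matched at the end of p
def pvPartial (p d : List Char) (j : Nat) : Prop :=
  0 < j ∧ j < d.length ∧ d.take j <:+ p

theorem pv_foldl_none (l : List Char) : List.foldl pvStep none l = none := by
  induction l with
  | nil => rfl
  | cons c l ih => simpa [pvStep] using ih

theorem pvExtend_eq_none_iff (c : Char) (A : List (List Char × Nat)) :
    pvExtend c A = none ↔ ∃ d j, (d, j) ∈ A ∧ d[j]? = some c ∧ j + 1 = d.length := by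
  induction A with
  | nil => simp [pvExtend]
  | cons x rest ih =>
    obtain ⟨d, j⟩ := x
    simp only [pvExtend]
    split_ifs with h1 h2
    · simp only [true_iff]
      exact ⟨d, j, by simp, h1, h2⟩
    · simp only [Option.map_eq_none_iff, ih, List.mem_cons]
      constructor
      · rintro ⟨d', j', hm, hg, hl⟩; exact ⟨d', j', Or.inr hm, hg, hl⟩
      · rintro ⟨d', j', hm, hg, hl⟩
        rcases hm with h | h
        · obtain ⟨rfl, rfl⟩ := Prod.mk.injEq .. ▸ h; cases h; exact absurd hl h2
        · exact ⟨d', j', h, hg, hl⟩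
    · simp only [ih, List.mem_cons]
      constructor
      · rintro ⟨d', j', hm, hg, hl⟩; exact ⟨d', j', Or.inr hm, hg, hl⟩
      · rintro ⟨d', j', hm, hg, hl⟩
        rcases hm with h | h
        · cases h; exact absurd hg h1
        · exact ⟨d', j', h, hg, hl⟩

theorem pvExtend_mem (c : Char) (A E : List (List Char × Nat))
    (h : pvExtend c A = some E) (x : List Char × Nat) :
    x ∈ E ↔ ∃ d j, (d, j) ∈ A ∧ d[j]? = some c ∧ j + 1 ≠ d.length ∧ x = (d, j + 1) := by
  induction A generalizing E with
  | nil =>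
    simp only [pvExtend, Option.some.injEq] at h
    subst h; simp
  | cons y rest ih =>
    obtain ⟨d, j⟩ := y
    simp only [pvExtend] at h
    split_ifs at h with h1 h2
    · obtain ⟨E', hE', rfl⟩ := Option.map_eq_some_iff.mp h
      simp only [List.mem_cons, ih E' hE', List.mem_cons]
      constructor
      · rintro (rfl | ⟨d', j', hm, hg, hl, rfl⟩)
        · exact ⟨d, j, Or.inl rfl, h1, h2, rfl⟩
        · exact ⟨d', j', Or.inr hm, hg, hl, rfl⟩
      · rintro ⟨d', j', hm, hg, hl, rfl⟩
        rcases hm with h | h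
        · cases h; exact Or.inl rfl
        · exact Or.inr ⟨d', j', h, hg, hl, rfl⟩
    · simp only [ih E h, List.mem_cons]
      constructor
      · rintro ⟨d', j', hm, hg, hl, rfl⟩; exact ⟨d', j', Or.inr hm, hg, hl, rfl⟩
      · rintro ⟨d', j', hm, hg, hl, rfl⟩
        rcases hm with h | h
        · cases h; exact absurd hg h1
        · exact ⟨d', j', h, hg, hl, rfl⟩

theorem pvStart_eq_none_iff (c : Char) (P : List (List Char)) :
    pvStart c P = none ↔ ∃ d, d ∈ P ∧ d[0]? = some c ∧ d.length = 1 := by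
  induction P with
  | nil => simp [pvStart]
  | cons d rest ih =>
    simp only [pvStart]
    split_ifs with h1 h2
    · simp only [true_iff]; exact ⟨d, by simp, h1, h2⟩
    · simp only [Option.map_eq_none_iff, ih, List.mem_cons]
      constructor
      · rintro ⟨d', hm, hg, hl⟩; exact ⟨d', Or.inr hm, hg, hl⟩
      · rintro ⟨d', hm, hg, hl⟩
        rcases hm with h | h
        · cases h; exact absurd hl h2
        · exact ⟨d', h, hg, hl⟩
    · simp only [ih, List.mem_cons]
      constructor
      · rintro ⟨d', hm, hg, hl⟩; exact ⟨d', Or.inr hm, hg, hl⟩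
      · rintro ⟨d', hm, hg, hl⟩
        rcases hm with h | h
        · cases h; exact absurd hg h1
        · exact ⟨d', h, hg, hl⟩

theorem pvStart_mem (c : Char) (P : List (List Char)) (S : List (List Char × Nat))
    (h : pvStart c P = some S) (x : List Char × Nat) :
    x ∈ S ↔ ∃ d, d ∈ P ∧ d[0]? = some c ∧ d.length ≠ 1 ∧ x = (d, 1) := by
  induction P generalizing S with
  | nil =>
    simp only [pvStart, Option.some.injEq] at h
    subst h; simp
  | cons d rest ih =>
    simp only [pvStart] at h
    split_ifs at h with h1 h2
    · obtain ⟨S', hS', rfl⟩ := Option.map_eq_some_iff.mp h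
      simp only [List.mem_cons, ih S' hS']
      constructor
      · rintro (rfl | ⟨d', hm, hg, hl, rfl⟩)
        · exact ⟨d, Or.inl rfl, h1, h2, rfl⟩
        · exact ⟨d', Or.inr hm, hg, hl, rfl⟩
      · rintro ⟨d', hm, hg, hl, rfl⟩
        rcases hm with h | h
        · cases h; exact Or.inl rfl
        · exact Or.inr ⟨d', h, hg, hl, rfl⟩
    · simp only [ih S h, List.mem_cons]
      constructor
      · rintro ⟨d', hm, hg, hl, rfl⟩; exact ⟨d', Or.inr hm, hg, hl, rfl⟩
      · rintro ⟨d', hm, hg, hl, rfl⟩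
        rcases hm with h | h
        · cases h; exact absurd hg h1
        · exact ⟨d', h, hg, hl, rfl⟩

-- suffix ending at the new char c, decomposed
theorem pv_suffix_concat {l p : List Char} {c : Char} (hne : l ≠ [])
    (h : l <:+ p ++ [c]) : ∃ l', l = l' ++ [c] ∧ l' <:+ p := by
  obtain ⟨t, ht⟩ := h
  obtain ⟨l', a, rfl⟩ := List.eq_nil_or_concat l |>.resolve_left hne
  rw [List.concat_eq_append, ← List.append_assoc] at ht
  have h2 := List.append_inj' ht (by rfl)
  have ha : a = c := by simpa using h2.2
  exact ⟨l', by rw [List.concat_eq_append, ha], ⟨t, h2.1⟩⟩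

-- infix of p ++ [c]: inside p, or a suffix ending at c
theorem pv_infix_concat {d p : List Char} {c : Char}
    (h : d <:+: p ++ [c]) : d <:+: p ∨ d <:+ p ++ [c] := by
  obtain ⟨t, u, htu⟩ := h
  rcases List.eq_nil_or_concat u with rfl | ⟨u', c', rfl⟩
  · right; exact ⟨t, by simpa using htu⟩
  · left
    rw [List.concat_eq_append, ← List.append_assoc] at htu
    have h2 := List.append_inj' htu (by rfl)
    exact ⟨t, u', by rw [← h2.1]⟩

-- take one more matched character
theorem pv_take_snoc {d p : List Char} {c : Char} {j : Nat}
    (hg : d[j]? = some c) (hs : d.take j <:+ p) : d.take (j + 1) <:+ p ++ [c] := by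
  obtain ⟨t, ht⟩ := hs
  exact ⟨t, by rw [List.take_add_one, hg, Option.toList_some, ← List.append_assoc, ← ht]⟩

theorem pv_main (rest : List Char) : ∀ (p : List Char) (A : List (List Char × Nat)),
    (∀ x ∈ A, x.1 ∈ pvPats ∧ pvPartial p x.1 x.2) →
    (∀ d ∈ pvPats, ∀ j, pvPartial p d j → (d, j) ∈ A) →
    (∀ d ∈ pvPats, ¬ d <:+: p) →
    ((List.foldl pvStep (some A) rest).isSome = true ↔
      ∀ d ∈ pvPats, ¬ d <:+: (p ++ rest)) := by
  induction rest with
  | nil =>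
    intro p A hsound hcomp hno
    simp only [List.foldl_nil, Option.isSome_some, List.append_nil, true_iff]
    exact hno
  | cons c rest ih =>
    intro p A hsound hcomp hno
    have hcat : p ++ c :: rest = (p ++ [c]) ++ rest := by simp
    simp only [List.foldl_cons]
    rcases hE : pvExtend c A with _ | E
    · -- an extension completed a pattern: that pattern is a suffix of p ++ [c]
      have hstep : pvStep (some A) c = none := by simp [pvStep, hE]
      rw [hstep, pv_foldl_none]
      simp only [Option.isSome_none, Bool.false_eq_true, false_iff]
      intro hall
      obtain ⟨d, j, hm, hg, hl⟩ := (pvExtend_eq_none_iff c A).mp hE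
      obtain ⟨hdP, _, _, hsuf⟩ := hsound _ hm
      have hdfull : d <:+ p ++ [c] := by
        have := pv_take_snoc hg hsuf
        rwa [hl, List.take_length] at this
      obtain ⟨t, ht⟩ := hdfull
      exact hall d hdP (by rw [hcat]; exact ⟨t, rest, by rw [ht]⟩)
    rcases hS : pvStart c pvPats with _ | S
    · -- a single-character pattern [c] matched
      have hstep : pvStep (some A) c = none := by simp [pvStep, hE, hS]
      rw [hstep, pv_foldl_none]
      simp only [Option.isSome_none, Bool.false_eq_true, false_iff]
      intro hall
      obtain ⟨d, hdP, hg, hl⟩ := (pvStart_eq_none_iff c pvPats).mp hS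
      have hd : d = [c] := by
        cases d with
        | nil => simp at hg
        | cons a t =>
          simp only [List.getElem?_cons_zero, Option.some.injEq] at hg
          cases t with
          | nil => rw [hg]
          | cons b u => simp at hl
      exact hall d hdP (by rw [hcat, hd]; exact ⟨p, rest, by simp⟩)
    · -- no completion: one step, then the induction hypothesis at p ++ [c]
      have hstep : pvStep (some A) c = some (E ++ S) := by simp [pvStep, hE, hS]
      rw [hstep, hcat]
      -- the new no-match fact at p ++ [c]
      have hno' : ∀ d ∈ pvPats, ¬ d <:+: p ++ [c] := by
        intro d hdP hinf
        rcases pv_infix_concat hinf with h | h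
        · exact hno d hdP h
        · obtain ⟨l', rfl, hl'⟩ := pv_suffix_concat (pv_pats_ne_nil d hdP) h
          have hgl : (l' ++ [c])[l'.length]? = some c := List.getElem?_concat_length ..
          have hlen : (l' ++ [c]).length = l'.length + 1 := by simp
          rcases Nat.eq_zero_or_pos l'.length with h0 | h0
          · -- single-char pattern: pvStart would have been none
            have : pvStart c pvPats = none := (pvStart_eq_none_iff c pvPats).mpr
              ⟨l' ++ [c], hdP, by
                have h0' := List.length_eq_zero_iff.mp h0
                subst h0'; simp only [List.nil_append, List.getElem?_cons_zero] at hgl; exact hgl,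
               by omega⟩
            rw [this] at hS; cases hS
          · -- longer pattern: (d, |d|-1) was live, so pvExtend would have been none
            have hmem : (l' ++ [c], l'.length) ∈ A := by
              refine hcomp _ hdP _ ⟨h0, by omega, ?_⟩
              rwa [List.take_left]
            have : pvExtend c A = none := (pvExtend_eq_none_iff c A).mpr
              ⟨l' ++ [c], l'.length, hmem, hgl, by omega⟩
            rw [this] at hE; cases hE
      refine ih (p ++ [c]) (E ++ S) ?_ ?_ hno'
      · -- soundness of the new active set
        intro x hx
        rcases List.mem_append.mp hx with hx | hx
        · obtain ⟨d, j', hm, hg, hl, rfl⟩ := (pvExtend_mem c A E hE x).mp hx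
          obtain ⟨hdP, _, hjlt, hsuf⟩ := hsound _ hm
          dsimp only at hdP hjlt hsuf ⊢
          exact ⟨hdP, Nat.succ_pos _, by omega, pv_take_snoc hg hsuf⟩
        · obtain ⟨d, hdP, hg, hl1, rfl⟩ := (pvStart_mem c pvPats S hS x).mp hx
          have hdl : 0 < d.length := (List.getElem?_eq_some_iff.mp hg).1
          dsimp only
          refine ⟨hdP, Nat.one_pos, by omega, ?_⟩
          have h1 : d.take 1 = [c] := by
            cases d with
            | nil => simp at hg
            | cons a t =>
              simp only [List.getElem?_cons_zero, Option.some.injEq] at hg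
              simp [hg]
          rw [h1]; exact List.suffix_append p [c]
      · -- completeness of the new active set
        intro d hdP j hpar
        obtain ⟨h0, hjlt, hsuf⟩ := hpar
        have hdne : d ≠ [] := pv_pats_ne_nil d hdP
        have hne : d.take j ≠ [] := fun h =>
          (List.take_eq_nil_iff.mp h).elim (fun h0 => by omega) hdne
        obtain ⟨l', heq, hl'⟩ := pv_suffix_concat hne hsuf
        obtain ⟨j', rfl⟩ : ∃ j', j = j' + 1 := ⟨j - 1, by omega⟩
        have hj' : j' < d.length := by omega
        have hx : d[j']? = some d[j'] := List.getElem?_eq_getElem hj'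
        rw [List.take_add_one, hx, Option.toList_some] at heq
        have h2 := List.append_inj' heq (by rfl)
        have hgc : d[j']? = some c := by
          rw [hx]; exact congrArg some (by simpa using h2.2)
        have htk : d.take j' = l' := h2.1
        rcases Nat.eq_zero_or_pos j' with rfl | hj0
        · refine List.mem_append.mpr (Or.inr ?_)
          exact (pvStart_mem c pvPats S hS _).mpr ⟨d, hdP, hgc, by omega, rfl⟩
        · refine List.mem_append.mpr (Or.inl ?_)
          have hmem : (d, j') ∈ A := hcomp d hdP j' ⟨hj0, by omega, htk ▸ hl'⟩
          exact (pvExtend_mem c A E hE _).mpr ⟨d, j', hmem, hgc, by omega, rfl⟩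

-- ===== VERDICT (by name: the statement is the Claim_ definition above) =====
theorem validate_command_spec : Claim_equal_validate_command := by
  intro cmd _
  unfold Spec_validate_command validate_command validate_command_alt
  rw [Bool.eq_iff_iff]
  have hmain := pv_main ((PySem.Str.lower cmd).toList) [] []
    (by simp) (by
      intro d hd j hj
      obtain ⟨h0, h1, h2⟩ := hj
      have := List.suffix_nil.mp h2
      rw [List.take_eq_nil_iff] at this
      rcases this with h | h
      · omega
      · subst h; simp at h1) (by
      intro d hd
      simp only [List.infix_nil]
      exact pv_pats_ne_nil d hd)
  simp only [List.nil_append] at hmain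
  simp only [List.all_eq_true, Bool.not_eq_eq_eq_not, Bool.not_true, PySem.Str.isIn_eq,
    PySem.Chars.isIn_eq_false_iff, hmain]
  unfold pvPats
  simp [PySem.Str.lower]
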